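-- pv_equiv track=rewrite | github.com/PiotrSzeliga/pp1 | 04-Subroutines/Exercise46.py | f
-- ===== SOURCE A (Python) =====
-- def f(x,y):
--     sum = 0
--     for i in range(x,y+1):
--         if i%2 == 0 and i%3 == 0 and i%4 != 0:
--             sum += i
--         else:
--             continue
--     return sum
-- ===== SOURCE B (Python) =====
-- def f(x, y):
--     # closed form: the qualifying numbers are exactly those == 6 (mod 12)
--     k0 = -((6 - x) // 12)       # ceil((x-6)/12): smallest k with 12k+6 >= x
--     k1 = (y - 6) // 12          # floor((y-6)/12): largest k with 12k+6 <= y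
--     n = k1 - k0 + 1
--     return 0 if n <= 0 else n * (6 * (k0 + k1 + 1))
-- ===== Notes on version B (the rewrite author's own statement) =====
-- stated objective: faster
-- what changed: Replaced the per-integer loop over [x,y] by a closed-form arithmetic-series formula over the numbers congruent to 6 mod 12.
import Mathlib
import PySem

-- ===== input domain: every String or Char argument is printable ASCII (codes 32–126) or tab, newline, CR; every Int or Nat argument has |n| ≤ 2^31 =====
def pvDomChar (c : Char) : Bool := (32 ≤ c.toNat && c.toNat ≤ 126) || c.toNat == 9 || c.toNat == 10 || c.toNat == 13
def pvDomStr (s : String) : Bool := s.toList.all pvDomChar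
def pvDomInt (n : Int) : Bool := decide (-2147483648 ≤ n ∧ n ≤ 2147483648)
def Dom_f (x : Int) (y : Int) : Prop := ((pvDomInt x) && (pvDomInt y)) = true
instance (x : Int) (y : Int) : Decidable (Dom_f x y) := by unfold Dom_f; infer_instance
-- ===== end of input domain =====

-- B replaces A's per-integer loop by an O(1) closed-form arithmetic series over the numbers ≡ 6 (mod 12).


-- ===== PORT A =====
-- 'for i in range(x, y+1)' ported as a tail-recursive loop over i (range is a lazy iterator in Python)
def fLoop (i : Int) (stop : Int) (sum : Int) : Int :=
  if i < stop then
    fLoop (i + 1) stop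
      (if PySem.Int.mod i 2 = 0 ∧ PySem.Int.mod i 3 = 0 ∧ ¬ (PySem.Int.mod i 4 = 0)
       then sum + i else sum)
  else sum
termination_by (stop - i).toNat
decreasing_by omega

def f (x : Int) (y : Int) : Int := fLoop x (y + 1) 0

-- ===== PORT B =====
def f_alt (x : Int) (y : Int) : Int :=
  let k0 : Int := -(PySem.Int.floordiv (6 - x) 12)
  let k1 : Int := PySem.Int.floordiv (y - 6) 12
  let n : Int := k1 - k0 + 1
  if n ≤ 0 then 0 else n * (6 * (k0 + k1 + 1))

-- ===== PRECONDITION & SPEC =====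
def Spec_f (x : Int) (y : Int) (out : Int) : Prop := out = f_alt x y
instance (x : Int) (y : Int) (out : Int) : Decidable (Spec_f x y out) := by unfold Spec_f; infer_instance

-- ===== CLAIM (what is proved, stated in full; the proofs are below) =====
def Claim_equal_f : Prop := ∀ (x : Int) (y : Int), Dom_f x y → Spec_f x y (f x y)

-- ===== LEMMAS AND PROOFS =====

-- A's filter condition is exactly "is congruent to 6 (mod 12)"
lemma cond_iff (i : Int) :
    (PySem.Int.mod i 2 = 0 ∧ PySem.Int.mod i 3 = 0 ∧ ¬ (PySem.Int.mod i 4 = 0)) ↔ i % 12 = 6 := by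
  rw [PySem.Int.mod_eq_emod_of_pos (a := i) (b := 2) (by norm_num),
      PySem.Int.mod_eq_emod_of_pos (a := i) (b := 3) (by norm_num),
      PySem.Int.mod_eq_emod_of_pos (a := i) (b := 4) (by norm_num)]
  omega

lemma fd12 (a : Int) : PySem.Int.floordiv a 12 = a / 12 :=
  PySem.Int.floordiv_eq_ediv_of_pos (by norm_num)

-- B's closed form on an empty interval
lemma alt_empty (x y : Int) (hxy : y < x) : f_alt x y = 0 := by
  simp only [f_alt, fd12]
  split_ifs with h
  · rfl
  · exfalso; omega

-- B's closed form satisfies the first-element recurrence of A's loop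
lemma alt_step (x y : Int) (hxy : x ≤ y) :
    f_alt x y = (if x % 12 = 6 then x else 0) + f_alt (x + 1) y := by
  simp only [f_alt, fd12]
  set e1 : Int := (6 - x) / 12 with he1
  set e1' : Int := (6 - (x + 1)) / 12 with he1'
  set e2 : Int := (y - 6) / 12 with he2
  have h1 : 12 * e1 <= 6 - x ∧ 6 - x < 12 * e1 + 12 := by omega
  have h1' : 12 * e1' <= 5 - x ∧ 5 - x < 12 * e1' + 12 := by omega
  have h2 : 12 * e2 <= y - 6 ∧ y - 6 < 12 * e2 + 12 := by omega
  by_cases hc : x % 12 = 6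
  · -- x is a term: the lower index advances by one
    have he : e1' = e1 - 1 := by omega
    have hx' : x = 6 - 12 * e1 := by omega
    have hn : ¬ (e2 - -e1 + 1 <= 0) := by omega
    rw [if_pos hc, if_neg hn]
    split_ifs with hp
    · -- rest of the range is empty: x is the only term
      have hee : e2 = -e1 := by omega
      rw [hee]; ring_nf; omega
    · rw [he, hx']; ring
  · -- x is not a term: both bounds are unchanged
    have he : e1' = e1 := by omega
    simp only [if_neg hc, he, zero_add]

-- the loop computes sum + (B's closed form on the remaining interval)
lemma loop_eq : ∀ (n : Nat) (i stop s : Int), (stop - i).toNat = n →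
    fLoop i stop s = s + f_alt i (stop - 1) := by
  intro n
  induction n with
  | zero =>
    intro i stop s hn
    rw [fLoop, if_neg (by omega : ¬ i < stop), alt_empty i (stop - 1) (by omega)]
    ring
  | succ m ih =>
    intro i stop s hn
    have hi : i < stop := by omega
    rw [fLoop, if_pos hi, ih (i + 1) stop _ (by omega),
        alt_step i (stop - 1) (by omega : i ≤ stop - 1)]
    by_cases hc : i % 12 = 6
    · rw [if_pos ((cond_iff i).mpr hc), if_pos hc]; ring
    · rw [if_neg (fun h => hc ((cond_iff i).mp h)), if_neg hc]; ring

-- ===== VERDICT (by name: the statement is the Claim_ definition above) =====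
theorem f_spec : Claim_equal_f := by
  intro x y _
  unfold Spec_f f
  rw [loop_eq (y + 1 - x).toNat x (y + 1) 0 rfl, (by ring : y + 1 - 1 = y)]
  ring
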